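-- pv_equiv track=rewrite | github.com/otanan/makeproject | makeproject/yamltree.py | get_substruct_strings
-- ===== SOURCE A (Python) =====
-- SPACE_TO_INDENT = 2 # number of spaces for a single indentation
--
-- def get_indent(line):
--     """ Gets the number of indents in a line (as spaces). """
--     return len(line) - len(line.lstrip())
--
-- def get_depth(line):
--     """ Gets the 'depth' of the line, i.e. a subfolder is one deeper even though as a string it may have 2 or 4 spaces of indentation further. """
--     return int(get_indent(line) / SPACE_TO_INDENT)
--
-- def get_depths(lines):
--     """ Get all of the depths for all lines. """
--     return [ get_depth(line) for line in lines ]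
--
-- def get_substruct_strings(struct_string):
--     """ Finds substructures within a structure string, i.e. top-level folders or files which aren't contained inside of other folder of the project. This corresponds to rows of the structure string without any indentation. """
--     lines = struct_string.splitlines()
--     num_lines = len(lines)
--     depths = get_depths(lines)
--     substruct_strings = []
--
--     start_index = 0
--     for i, depth in enumerate(depths[1:], start=1):
--         if depth != 0: continue
--
--         substruct_strings.append('\n'.join(lines[start_index:i]))
--         start_index = i
--
--     substruct_strings.append('\n'.join(lines[start_index:num_lines]))
--     return substruct_strings
-- ===== SOURCE B (Python) =====
-- def get_substruct_strings(struct_string):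
--     """ Single pass with a current-group buffer: a line with depth 0 (indent < 2 spaces) starts a new top-level group. """
--     result = []
--     buf = []
--     for line in struct_string.splitlines():
--         if buf and len(line) - len(line.lstrip()) < 2:
--             result.append('\n'.join(buf))
--             buf = []
--         buf.append(line)
--     result.append('\n'.join(buf))
--     return result
-- ===== Notes on version B (the rewrite author's own statement) =====
-- stated objective: simpler
-- what changed: Replaced the precomputed depths list and start_index/slice bookkeeping over enumerated indices with a single pass that keeps a current-group line buffer, flushing it whenever a depth-0 line follows a non-empty buffer.
import Mathlib
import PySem

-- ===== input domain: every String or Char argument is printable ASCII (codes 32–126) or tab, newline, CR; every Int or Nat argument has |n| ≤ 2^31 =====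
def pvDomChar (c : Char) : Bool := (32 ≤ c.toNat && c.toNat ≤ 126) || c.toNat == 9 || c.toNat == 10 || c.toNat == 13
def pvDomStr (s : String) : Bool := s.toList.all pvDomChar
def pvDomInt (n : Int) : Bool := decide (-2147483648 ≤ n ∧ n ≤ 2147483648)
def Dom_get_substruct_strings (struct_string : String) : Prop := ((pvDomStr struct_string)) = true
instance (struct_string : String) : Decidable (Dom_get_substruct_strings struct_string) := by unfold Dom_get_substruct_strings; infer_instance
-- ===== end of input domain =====

-- B replaces A's depths list + start_index/slice bookkeeping with a single pass keeping a current-group buffer (simpler decomposition).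


-- ===== PORT A =====
-- get_indent(line) = len(line) - len(line.lstrip())
def pvGetIndent (line : String) : Int :=
  PySem.Str.len line - PySem.Str.len (PySem.Str.lstrip line)

-- get_depth(line) = int(get_indent(line) / 2)
def pvGetDepth (line : String) : Int :=
  PySem.Int.truncdiv (pvGetIndent line) 2

-- get_depths(lines)
def pvGetDepths (lines : List String) : List Int := lines.map pvGetDepth

def get_substruct_strings (struct_string : String) : List String :=
  let lines := PySem.Str.splitlines struct_string
  let num_lines : Int := (lines.length : Int)
  let depths := pvGetDepths lines
  -- state: (substruct_strings, start_index); loop over enumerate(depths[1:], start=1)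
  let st := (PySem.List.enumerate (PySem.List.slice depths (some 1) none) 1).foldl
    (fun (st : List String × Int) (p : Int × Int) =>
      if p.2 ≠ 0 then st
      else (st.1 ++ [PySem.Str.join "\n" (PySem.List.slice lines (some st.2) (some p.1))], p.1))
    ([], 0)
  st.1 ++ [PySem.Str.join "\n" (PySem.List.slice lines (some st.2) (some num_lines))]

-- ===== PORT B =====
-- B's flush test: len(line) - len(line.lstrip()) < 2
def pvFlush (line : String) : Bool :=
  PySem.Str.len line - PySem.Str.len (PySem.Str.lstrip line) < 2

def get_substruct_strings_alt (struct_string : String) : List String :=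
  -- state: (result, buf); one pass over the lines
  let st := (PySem.Str.splitlines struct_string).foldl
    (fun (st : List String × List String) line =>
      if st.2 ≠ [] ∧ pvFlush line
      then (st.1 ++ [PySem.Str.join "\n" st.2], [line])
      else (st.1, st.2 ++ [line]))
    ([], [])
  st.1 ++ [PySem.Str.join "\n" st.2]

-- ===== PRECONDITION & SPEC =====
def Spec_get_substruct_strings (struct_string : String) (out : List String) : Prop := out = get_substruct_strings_alt struct_string
instance (struct_string : String) (out : List String) : Decidable (Spec_get_substruct_strings struct_string out) := by unfold Spec_get_substruct_strings; infer_instance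

-- ===== CLAIM (what is proved, stated in full; the proofs are below) =====
def Claim_equal_get_substruct_strings : Prop := ∀ (struct_string : String), Dom_get_substruct_strings struct_string → Spec_get_substruct_strings struct_string (get_substruct_strings struct_string)

-- ===== LEMMAS AND PROOFS =====

-- shared recursive description of the grouping: pvG buf rest = groups produced from buffered lines `buf` and remaining lines `rest`
def pvG : List String → List String → List String
  | buf, [] => [PySem.Str.join "\n" buf]
  | buf, l :: rest =>
    if buf ≠ [] ∧ pvFlush l
    then PySem.Str.join "\n" buf :: pvG [l] rest
    else pvG (buf ++ [l]) rest

-- the indent is nonnegative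
lemma pvGetIndent_nonneg (l : String) : 0 ≤ pvGetIndent l := by
  simp only [pvGetIndent, PySem.Str.len_eq, PySem.Str.toList_lstrip, PySem.Chars.lstrip]
  have := List.length_dropWhile_le PySem.Chars.isspace l.toList
  omega

-- A's continue-test and B's flush-test agree
lemma pvDepth_eq_zero_iff (l : String) : pvGetDepth l = 0 ↔ pvFlush l = true := by
  have h := pvGetIndent_nonneg l
  rw [pvGetDepth, show pvFlush l = decide (pvGetIndent l < 2) from rfl]
  simp only [PySem.Int.truncdiv, Int.tdiv_eq_ediv_of_nonneg h, decide_eq_true_eq]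
  omega

lemma pvG_nil (buf : List String) : pvG buf [] = [PySem.Str.join "\n" buf] := rfl

lemma pvG_cons (buf : List String) (l : String) (rest : List String) :
    pvG buf (l :: rest) =
      if buf ≠ [] ∧ pvFlush l
      then PySem.Str.join "\n" buf :: pvG [l] rest
      else pvG (buf ++ [l]) rest := rfl

-- B's loop = pvG
lemma pvB_loop (rest : List String) (acc buf : List String) :
    (let st := rest.foldl
      (fun (st : List String × List String) line =>
        if st.2 ≠ [] ∧ pvFlush line
        then (st.1 ++ [PySem.Str.join "\n" st.2], [line])
        else (st.1, st.2 ++ [line]))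
      (acc, buf)
     st.1 ++ [PySem.Str.join "\n" st.2]) = acc ++ pvG buf rest := by
  induction rest generalizing acc buf with
  | nil => simp [pvG_nil]
  | cons l rest ih =>
    simp only [List.foldl_cons, pvG_cons]
    by_cases h : buf ≠ [] ∧ pvFlush l
    · simp only [if_pos h, ih]
      simp
    · simp only [if_neg h, ih]

-- A's loop = pvG (invariant: the current buffer lines[start:j] is nonempty since start < j)
lemma pvA_loop (lines : List String) (j start : Nat) (h1 : start < j) (h2 : j ≤ lines.length)
    (acc : List String) :
    (let st := (PySem.List.enumerate ((pvGetDepths lines).drop j) (j : Int)).foldl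
      (fun (st : List String × Int) (p : Int × Int) =>
        if p.2 ≠ 0 then st
        else (st.1 ++ [PySem.Str.join "\n" (PySem.List.slice lines (some st.2) (some p.1))], p.1))
      (acc, (start : Int))
     st.1 ++ [PySem.Str.join "\n" (PySem.List.slice lines (some st.2) (some (lines.length : Int)))])
    = acc ++ pvG ((lines.drop start).take (j - start)) (lines.drop j) := by
  induction hn : lines.length - j generalizing j start acc with
  | zero =>
    have hj : j = lines.length := by omega
    subst hj
    have h0 : (pvGetDepths lines).drop lines.length = [] := by
      simp [pvGetDepths]
    rw [h0]
    simp only [PySem.List.enumerate_nil, List.foldl_nil, PySem.List.slice_natCast,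
      List.drop_length, pvG_nil]
  | succ n ih =>
    have hj : j < lines.length := by omega
    have hdrop : lines.drop j = lines[j] :: lines.drop (j + 1) :=
      List.drop_eq_getElem_cons hj
    have hddrop : (pvGetDepths lines).drop j =
        pvGetDepth lines[j] :: (pvGetDepths lines).drop (j + 1) := by
      unfold pvGetDepths
      rw [← List.map_drop, hdrop, List.map_cons, List.map_drop]
    rw [hddrop, PySem.List.enumerate_cons, hdrop, List.foldl_cons, pvG_cons]
    have hbuf : (lines.drop start).take (j - start) ≠ [] := by
      have hl : ((lines.drop start).take (j - start)).length = j - start := by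
        rw [List.length_take, List.length_drop]; omega
      intro hc; rw [hc] at hl; simp at hl; omega
    have htake : (lines.drop start).take (j + 1 - start) =
        (lines.drop start).take (j - start) ++ [lines[j]] := by
      have h3 : j + 1 - start = (j - start) + 1 := by omega
      rw [h3, List.take_add_one]
      have h4 : (lines.drop start)[j - start]? = some lines[j] := by
        rw [List.getElem?_drop]
        have h5 : start + (j - start) = j := by omega
        rw [h5, List.getElem?_eq_getElem hj]
      rw [h4]; rfl
    by_cases hd : pvGetDepth lines[j] = 0
    · -- flush: depth == 0
      have hfl : pvFlush lines[j] = true := (pvDepth_eq_zero_iff _).mp hd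
      simp only [ne_eq, hd, not_true_eq_false, if_false]
      rw [if_pos (And.intro hbuf hfl)]
      have hIH := ih (j + 1) j (by omega) (by omega)
        (acc ++ [PySem.Str.join "\n" (PySem.List.slice lines (some (start : Int)) (some (j : Int)))])
        (by omega)
      push_cast at hIH ⊢
      rw [hIH]
      have hb1 : (lines.drop j).take (j + 1 - j) = [lines[j]] := by
        have h6 : j + 1 - j = 1 := by omega
        rw [h6, hdrop]; rfl
      rw [hb1, PySem.List.slice_natCast]
      simp
    · -- continue: depth != 0
      have hfl : pvFlush lines[j] = false := by
        cases hf : pvFlush lines[j]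
        · rfl
        · exact absurd ((pvDepth_eq_zero_iff _).mpr hf) hd
      simp only [ne_eq, hd, not_false_eq_true, if_true]
      rw [if_neg (by simp [hfl])]
      have hIH := ih (j + 1) start (by omega) (by omega) acc (by omega)
      push_cast at hIH ⊢
      rw [hIH, htake]

-- ===== VERDICT (by name: the statement is the Claim_ definition above) =====
theorem get_substruct_strings_spec : Claim_equal_get_substruct_strings := by
  intro s _
  unfold Spec_get_substruct_strings get_substruct_strings get_substruct_strings_alt
  cases hls : PySem.Str.splitlines s with
  | nil => simp [pvGetDepths, PySem.List.slice]
  | cons l rest =>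
    have hslice : PySem.List.slice (pvGetDepths (l :: rest)) (some 1) none =
        (pvGetDepths (l :: rest)).drop 1 := by
      have h := PySem.List.slice_from_natCast (pvGetDepths (l :: rest)) 1
      simpa using h
    simp only [hslice]
    have hA := pvA_loop (l :: rest) 1 0 (by omega) (by simp) []
    push_cast at hA
    rw [hA]
    have hB := pvB_loop (l :: rest) [] []
    rw [hB]
    simp
    rw [pvG_cons]
    simp
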